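-- pv_equiv track=rewrite | github.com/pglen/pyedpro | pyedlib/pedutil.py | calc_tabs
-- ===== SOURCE A (Python) =====
-- def calc_tabs(strx, till, tabstop = 4):
--     idx = 0; cnt = 0
--     xlen = min(len(strx), till);
--     while True:
--         if idx >= xlen: break
--         chh = strx[idx]
--         if  chh == "\t":
--             cnt += tabstop - (cnt % tabstop)
--         else:
--             cnt += 1
--         idx += 1
--     return cnt
-- ===== SOURCE B (Python) =====
-- def calc_tabs(strx, till, tabstop = 4):
--     bound = min(len(strx), till)
--     parts = strx[:max(0, bound)].split('\t')
--     cnt = len(parts[0])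
--     for part in parts[1:]:
--         cnt += tabstop - (cnt % tabstop) + len(part)
--     return cnt
-- ===== Notes on version B (the rewrite author's own statement) =====
-- stated objective: faster
-- what changed: Replaces A's per-character while-loop (testing each char for tab) by slicing the prefix once, splitting it on '\t', and folding over the tab-separated runs: length of the first run, then next-tab-stop rounding plus run length per remaining run.
import Mathlib
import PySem

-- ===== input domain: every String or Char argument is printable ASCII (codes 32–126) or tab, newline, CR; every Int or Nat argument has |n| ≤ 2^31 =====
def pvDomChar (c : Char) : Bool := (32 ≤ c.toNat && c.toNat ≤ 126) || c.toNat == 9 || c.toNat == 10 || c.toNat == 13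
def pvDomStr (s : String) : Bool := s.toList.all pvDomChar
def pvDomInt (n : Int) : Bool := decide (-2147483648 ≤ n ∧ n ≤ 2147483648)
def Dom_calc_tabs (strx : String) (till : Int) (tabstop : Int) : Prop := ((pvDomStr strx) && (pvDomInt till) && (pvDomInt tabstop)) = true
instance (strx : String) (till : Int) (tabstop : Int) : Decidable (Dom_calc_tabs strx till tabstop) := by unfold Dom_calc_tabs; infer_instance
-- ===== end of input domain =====

-- B replaces A's per-character while-loop by a split-on-tab pass over the runs between
-- tabs (objective: alternative decomposition; same asymptotic cost).

-- ===== PORT A =====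
-- A's while-loop: walks the prefix strx[:min(len(strx), till)] one character at a time,
-- adding 1 per ordinary character and rounding cnt up to the next tab stop on '\t'.
def calcTabsLoop (tabstop : Int) : List Char → Int → Int
  | [], cnt => cnt
  | c :: rest, cnt =>
    if c = '\t' then calcTabsLoop tabstop rest (cnt + (tabstop - PySem.Int.mod cnt tabstop))
    else calcTabsLoop tabstop rest (cnt + 1)

def calc_tabs (strx : String) (till : Int) (tabstop : Int) : Int :=
  let xlen : Int := min ((strx.toList.length : Int)) till
  -- the loop reads exactly the characters strx[0..xlen-1]; xlen.toNat = 0 when xlen < 0 (loop body never runs)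
  calcTabsLoop tabstop (strx.toList.take xlen.toNat) 0

-- ===== PORT B =====
-- Source B: parts = strx[:max(0, min(len(strx), till))].split('\t');  List.splitOn is the
-- corresponding Lean function (Python's str.split with a 1-char separator keeps empty runs,
-- exactly like List.splitOn; ''.split('\t') = [''] = splitOn of []).
def calc_tabs_alt (strx : String) (till : Int) (tabstop : Int) : Int :=
  let bound : Int := min ((strx.toList.length : Int)) till
  let parts := (strx.toList.take (max 0 bound).toNat).splitOn '\t'
  match parts with
  | [] => 0  -- unreachable: splitOn never returns []
  | h :: t =>
    t.foldl (fun cnt part => cnt + (tabstop - PySem.Int.mod cnt tabstop) + (part.length : Int))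
      ((h.length : Int))

-- ===== PRECONDITION & SPEC =====
-- A raises ZeroDivisionError exactly when tabstop = 0 and a tab occurs in the scanned prefix.
def Pre_calc_tabs (strx : String) (till : Int) (tabstop : Int) : Prop :=
  ¬ (tabstop = 0 ∧ '\t' ∈ strx.toList.take (min ((strx.toList.length : Int)) till).toNat)
instance (strx : String) (till : Int) (tabstop : Int) : Decidable (Pre_calc_tabs strx till tabstop) := by unfold Pre_calc_tabs; infer_instance

def pvWitness_calc_tabs : String × Int × Int := ("a\tb", 5, 4)

def Spec_calc_tabs (strx : String) (till : Int) (tabstop : Int) (out : Int) : Prop := out = calc_tabs_alt strx till tabstop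
instance (strx : String) (till : Int) (tabstop : Int) (out : Int) : Decidable (Spec_calc_tabs strx till tabstop out) := by unfold Spec_calc_tabs; infer_instance

-- ===== CLAIM (what is proved, stated in full; the proofs are below) =====
def Claim_equal_calc_tabs : Prop := ∀ (strx : String) (till : Int) (tabstop : Int), Dom_calc_tabs strx till tabstop → Pre_calc_tabs strx till tabstop → Spec_calc_tabs strx till tabstop (calc_tabs strx till tabstop)

-- ===== LEMMAS AND PROOFS =====

-- The per-character loop equals the fold over the tab-separated runs, for any start count.
theorem calcTabsLoop_splitOn (ts : Int) (l : List Char) (cnt : Int) :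
    calcTabsLoop ts l cnt =
      match l.splitOn '\t' with
      | [] => cnt
      | h :: t =>
        t.foldl (fun c part => c + (ts - PySem.Int.mod c ts) + (part.length : Int))
          (cnt + (h.length : Int)) := by
  induction l generalizing cnt with
  | nil => simp [calcTabsLoop, List.splitOn]
  | cons c rest ih =>
    have hsplit := List.splitOnP_cons (· == '\t') c rest
    obtain ⟨h, t, hht⟩ := List.exists_cons_of_ne_nil (List.splitOnP_ne_nil (· == '\t') rest)
    by_cases hc : c = '\t'
    · simp only [calcTabsLoop, hc, List.splitOn]
      simp only [if_pos]
      rw [ih]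
      simp [List.splitOn, hht, List.foldl_cons]
    · simp only [calcTabsLoop, if_neg hc, List.splitOn, hsplit, hht]
      have : (c == '\t') = false := by simp [hc]
      simp only [this, Bool.false_eq_true]
      rw [ih]
      simp [List.splitOn, hht, List.modifyHead]
      ring_nf

theorem toNat_max_zero (n : Int) : (max 0 n).toNat = n.toNat := by
  rw [Int.max_def]; split_ifs with h <;> omega

-- ===== VERDICT (by name: the statement is the Claim_ definition above) =====
theorem calc_tabs_spec : Claim_equal_calc_tabs := by
  intro strx till tabstop _ _
  unfold Spec_calc_tabs calc_tabs calc_tabs_alt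
  simp only [toNat_max_zero]
  rw [calcTabsLoop_splitOn]
  cases h : (strx.toList.take (min ((strx.toList.length : Int)) till).toNat).splitOn '\t' with
  | nil => exact absurd h (by unfold List.splitOn; exact List.splitOnP_ne_nil _ _)
  | cons hd tl => simp
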